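-- pv_equiv track=rewrite | github.com/kevinthesun/tvm | topi/python/topi/cuda/conv2d.py | _generate_split_factor
-- ===== SOURCE A (Python) =====
-- def _generate_split_factor(num_filters):
--     num_candidates = 3
--     tmp = []
--     for i in range(num_filters):
--         if num_filters % (i + 1) == 0:
--             tmp.append(i + 1)
--     ret = []
--     for i in tmp:
--         if len(ret) == num_candidates:
--             break
--         if 4 <= i <= 16:
--             ret.append(i)
--     if len(ret) < num_candidates:
--         tmp.reverse()
--         for i in tmp:
--             if i not in ret:
--                 ret.append(i)
--             if len(ret) == num_candidates:
--                 break
--     return ret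
-- ===== SOURCE B (Python) =====
-- def _generate_split_factor(num_filters):
--     # Enumerate divisors only up to sqrt(num_filters), pairing i with num_filters // i.
--     small, large = [], []
--     i = 1
--     while i * i <= num_filters:
--         if num_filters % i == 0:
--             small.append(i)
--             if i != num_filters // i:
--                 large.append(num_filters // i)
--         i += 1
--     divs = small + large[::-1]          # all divisors, ascending
--     ret = [d for d in divs if 4 <= d <= 16][:3]
--     if len(ret) < 3:
--         for d in reversed(divs):
--             if len(ret) == 3:
--                 break
--             if d not in ret:
--                 ret.append(d)
--     return ret
-- ===== Notes on version B (the rewrite author's own statement) =====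
-- stated objective: faster
-- what changed: B enumerates divisors only up to the square root of num_filters, pairing each small divisor i with its cofactor num_filters//i, instead of A's trial division over all of range(num_filters); the same candidate selection is then applied.
import Mathlib
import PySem

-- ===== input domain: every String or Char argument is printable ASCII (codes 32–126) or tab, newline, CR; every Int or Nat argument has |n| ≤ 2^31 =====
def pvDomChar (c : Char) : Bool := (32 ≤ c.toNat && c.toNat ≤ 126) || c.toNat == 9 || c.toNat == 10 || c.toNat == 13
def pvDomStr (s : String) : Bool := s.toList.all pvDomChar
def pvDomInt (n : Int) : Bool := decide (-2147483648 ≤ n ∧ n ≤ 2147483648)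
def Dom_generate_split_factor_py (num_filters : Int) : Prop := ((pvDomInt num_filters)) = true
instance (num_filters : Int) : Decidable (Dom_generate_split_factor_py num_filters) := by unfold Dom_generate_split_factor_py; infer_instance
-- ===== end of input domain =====

-- B replaces A's trial division over all of range(num_filters) by divisor enumeration up to the square root (pairing i with num_filters // i), then applies the same candidate selection (objective: faster, measured).

-- ===== PORT A =====
-- 'for i in tmp: if len(ret)==3: break; if 4<=i<=16: ret.append(i)'
def pvPhase1 : List Int → List Int → List Int
  | [], ret => ret
  | i :: rest, ret =>
      if ret.length = 3 then ret
      else if 4 ≤ i ∧ i ≤ 16 then pvPhase1 rest (ret ++ [i])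
      else pvPhase1 rest ret

-- 'for i in tmp(reversed): if i not in ret: ret.append(i); if len(ret)==3: break'
def pvPhase2 : List Int → List Int → List Int
  | [], ret => ret
  | i :: rest, ret =>
      let r := if i ∈ ret then ret else ret ++ [i]
      if r.length = 3 then r else pvPhase2 rest r

def generate_split_factor_py (num_filters : Int) : List Int :=
  let tmp := (PySem.List.pyRange 0 num_filters).foldl
      (fun acc i => if PySem.Int.mod num_filters (i + 1) == 0 then acc ++ [i + 1] else acc) []
  let ret := pvPhase1 tmp []
  if ret.length < 3 then pvPhase2 tmp.reverse ret else ret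

-- ===== PORT B =====
-- 'while i*i <= n: if n % i == 0: small.append(i); if i != n//i: large.append(n//i); i += 1'
def pvLoopB (n i : Int) (small large : List Int) : List Int × List Int :=
  if h : i * i ≤ n then
    if PySem.Int.mod n i == 0 then
      pvLoopB n (i + 1) (small ++ [i])
        (if i ≠ PySem.Int.floordiv n i then large ++ [PySem.Int.floordiv n i] else large)
    else pvLoopB n (i + 1) small large
  else (small, large)
termination_by (n + 1 - i).toNat
decreasing_by
  all_goals
    have hin : i ≤ n := by nlinarith [mul_self_nonneg i, mul_self_nonneg (i - 1)]
    omega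

-- 'for d in reversed(divs): if len(ret)==3: break; if d not in ret: ret.append(d)'
def pvFill : List Int → List Int → List Int
  | [], ret => ret
  | d :: rest, ret =>
      if ret.length = 3 then ret
      else if d ∈ ret then pvFill rest ret
      else pvFill rest (ret ++ [d])

def generate_split_factor_py_alt (num_filters : Int) : List Int :=
  let p := pvLoopB num_filters 1 [] []
  let divs := p.1 ++ p.2.reverse
  let ret := (divs.filter (fun d => decide (4 ≤ d ∧ d ≤ 16))).take 3
  if ret.length < 3 then pvFill divs.reverse ret else ret

-- ===== PRECONDITION & SPEC =====
def Spec_generate_split_factor_py (num_filters : Int) (out : List Int) : Prop := out = generate_split_factor_py_alt num_filters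
instance (num_filters : Int) (out : List Int) : Decidable (Spec_generate_split_factor_py num_filters out) := by unfold Spec_generate_split_factor_py; infer_instance

-- ===== CLAIM (what is proved, stated in full; the proofs are below) =====
def Claim_equal_generate_split_factor_py : Prop := ∀ (num_filters : Int), Dom_generate_split_factor_py num_filters → Spec_generate_split_factor_py num_filters (generate_split_factor_py num_filters)

-- ===== LEMMAS AND PROOFS =====

-- the ascending list of positive divisors of n (proof-side characterisation of both ports' lists)
def pvDivsAsc (n : Int) : List Int :=
  (PySem.List.pyRange 1 (n + 1)).filter (fun d => PySem.Int.mod n d == 0)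

theorem pvDivsAsc_mem (n d : Int) :
    d ∈ pvDivsAsc n ↔ 1 ≤ d ∧ d ≤ n ∧ d ∣ n := by
  simp [pvDivsAsc, List.mem_filter, PySem.List.mem_pyRange_one,
    PySem.Int.mod_eq_zero_iff_dvd]
  omega

theorem pvDivsAsc_pairwise (n : Int) : (pvDivsAsc n).Pairwise (· < ·) :=
  (PySem.List.pairwise_lt_pyRange_one 1 (n + 1)).filter _

theorem pvTmpA_eq (n : Int) :
    (PySem.List.pyRange 0 n).foldl
      (fun acc i => if PySem.Int.mod n (i + 1) == 0 then acc ++ [i + 1] else acc) []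
      = pvDivsAsc n := by
  rw [PySem.List.foldl_append_if (fun i => PySem.Int.mod n (i + 1) == 0) (fun i => i + 1)]
  rw [List.nil_append]
  apply List.eq_of_perm_of_sorted (le := (· < ·))
    (fun a b _ _ hab hba => absurd hab (by omega))
  · -- pairwise on the mapped filter
    have h := (PySem.List.pairwise_lt_pyRange_one 0 n).filter
      (fun i => PySem.Int.mod n (i + 1) == 0)
    exact (List.pairwise_map).mpr (h.imp (by omega))
  · exact pvDivsAsc_pairwise n
  · -- permutation via equal membership and nodup
    apply (List.perm_ext_iff_of_nodup ?_ ?_).mpr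
    · intro d
      simp [List.mem_map, List.mem_filter, PySem.List.mem_pyRange_one,
        pvDivsAsc_mem, PySem.Int.mod_eq_zero_iff_dvd]
      constructor
      · rintro ⟨i, ⟨⟨h0, hn⟩, hdvd⟩, rfl⟩; exact ⟨by omega, by omega, hdvd⟩
      · rintro ⟨h1, hn, hdvd⟩; exact ⟨d - 1, ⟨⟨by omega, by omega⟩, by simpa⟩, by omega⟩
    · have h := (PySem.List.pairwise_lt_pyRange_one 0 n).filter
        (fun i => PySem.Int.mod n (i + 1) == 0)
      exact ((List.pairwise_map).mpr (h.imp (by omega : ∀ {a b : Int}, a < b → a + 1 ≠ b + 1)))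
    · exact ((pvDivsAsc_pairwise n).imp (by omega : ∀ {a b : Int}, a < b → a ≠ b))

-- membership in the first component of the sqrt loop
theorem pvLoopB_mem_fst (n : Int) :
    ∀ i small large, 1 ≤ i → ∀ d,
      (d ∈ (pvLoopB n i small large).1 ↔
        d ∈ small ∨ (i ≤ d ∧ d * d ≤ n ∧ d ∣ n)) := by
  intro i small large hi d
  induction i, small, large using pvLoopB.induct n with
  | case1 i small large h hm ih =>
    rw [pvLoopB, dif_pos h, if_pos hm]
    simp only [dite_eq_ite] at ih
    rw [ih (by omega)]
    have hdvd : i ∣ n := (PySem.Int.mod_eq_zero_iff_dvd n i).mp (by simpa using hm)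
    simp only [List.mem_append, List.mem_singleton]
    constructor
    · rintro ((hs | rfl) | ⟨h1, h2, h3⟩)
      · exact Or.inl hs
      · exact Or.inr ⟨le_refl _, h, hdvd⟩
      · exact Or.inr ⟨by omega, h2, h3⟩
    · rintro (hs | ⟨h1, h2, h3⟩)
      · exact Or.inl (Or.inl hs)
      · rcases eq_or_lt_of_le h1 with rfl | hlt
        · exact Or.inl (Or.inr rfl)
        · exact Or.inr ⟨by omega, h2, h3⟩
  | case2 i small large h hm ih =>
    rw [pvLoopB, dif_pos h, if_neg hm]
    rw [ih (by omega)]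
    have hndvd : ¬ i ∣ n := fun hd => by
      simp [(PySem.Int.mod_eq_zero_iff_dvd n i).mpr hd] at hm
    constructor
    · rintro (hs | ⟨h1, h2, h3⟩)
      · exact Or.inl hs
      · exact Or.inr ⟨by omega, h2, h3⟩
    · rintro (hs | ⟨h1, h2, h3⟩)
      · exact Or.inl hs
      · rcases eq_or_lt_of_le h1 with rfl | hlt
        · exact absurd h3 hndvd
        · exact Or.inr ⟨by omega, h2, h3⟩
  | case3 i small large h =>
    rw [pvLoopB, dif_neg h]
    constructor
    · exact Or.inl
    · rintro (hs | ⟨h1, h2, h3⟩)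
      · exact hs
      · exact absurd h2 (by nlinarith)

-- membership in the second component of the sqrt loop
theorem pvLoopB_mem_snd (n : Int) :
    ∀ i small large, 1 ≤ i → ∀ d,
      (d ∈ (pvLoopB n i small large).2 ↔
        d ∈ large ∨ (∃ j, i ≤ j ∧ j * j ≤ n ∧ j ∣ n ∧
          j ≠ PySem.Int.floordiv n j ∧ d = PySem.Int.floordiv n j)) := by
  intro i small large hi d
  induction i, small, large using pvLoopB.induct n with
  | case1 i small large h hm ih =>
    rw [pvLoopB, dif_pos h, if_pos hm]
    simp only [dite_eq_ite] at ih
    rw [ih (by omega)]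
    have hdvd : i ∣ n := (PySem.Int.mod_eq_zero_iff_dvd n i).mp (by simpa using hm)
    by_cases hne : i ≠ PySem.Int.floordiv n i
    · rw [if_pos hne]
      simp only [List.mem_append, List.mem_singleton]
      constructor
      · rintro ((hl | rfl) | ⟨j, h1, h2, h3, h4, h5⟩)
        · exact Or.inl hl
        · exact Or.inr ⟨i, le_refl _, h, hdvd, hne, rfl⟩
        · exact Or.inr ⟨j, by omega, h2, h3, h4, h5⟩
      · rintro (hl | ⟨j, h1, h2, h3, h4, h5⟩)
        · exact Or.inl (Or.inl hl)
        · rcases eq_or_lt_of_le h1 with rfl | hlt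
          · exact Or.inl (Or.inr h5)
          · exact Or.inr ⟨j, by omega, h2, h3, h4, h5⟩
    · rw [if_neg hne]
      rw [not_not] at hne
      constructor
      · rintro (hl | ⟨j, h1, h2, h3, h4, h5⟩)
        · exact Or.inl hl
        · exact Or.inr ⟨j, by omega, h2, h3, h4, h5⟩
      · rintro (hl | ⟨j, h1, h2, h3, h4, h5⟩)
        · exact Or.inl hl
        · rcases eq_or_lt_of_le h1 with rfl | hlt
          · exact absurd hne h4
          · exact Or.inr ⟨j, by omega, h2, h3, h4, h5⟩
  | case2 i small large h hm ih =>
    rw [pvLoopB, dif_pos h, if_neg hm]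
    rw [ih (by omega)]
    have hndvd : ¬ i ∣ n := fun hd => by
      simp [(PySem.Int.mod_eq_zero_iff_dvd n i).mpr hd] at hm
    constructor
    · rintro (hl | ⟨j, h1, h2, h3, h4, h5⟩)
      · exact Or.inl hl
      · exact Or.inr ⟨j, by omega, h2, h3, h4, h5⟩
    · rintro (hl | ⟨j, h1, h2, h3, h4, h5⟩)
      · exact Or.inl hl
      · rcases eq_or_lt_of_le h1 with rfl | hlt
        · exact absurd h3 hndvd
        · exact Or.inr ⟨j, by omega, h2, h3, h4, h5⟩
  | case3 i small large h =>
    rw [pvLoopB, dif_neg h]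
    constructor
    · exact Or.inl
    · rintro (hl | ⟨j, h1, h2, h3, h4, h5⟩)
      · exact hl
      · exact absurd h2 (by nlinarith)

-- sortedness of the concatenated result, under the loop invariant
theorem pvLoopB_pairwise (n : Int) :
    ∀ i small large, 1 ≤ i →
      small.Pairwise (· < ·) → (∀ s ∈ small, s < i) → (∀ s ∈ small, 1 ≤ s) →
      (∀ s ∈ small, s * s ≤ n) →
      large.Pairwise (· > ·) → (∀ l ∈ large, 1 ≤ l) → (∀ l ∈ large, n < l * l) →
      (∀ l ∈ large, n < i * l) →
      ((pvLoopB n i small large).1 ++ (pvLoopB n i small large).2.reverse).Pairwise (· < ·) := by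
  intro i small large hi ha hb hh hf hc he hd hd2
  induction i, small, large using pvLoopB.induct n with
  | case1 i small large h hm ih =>
    rw [pvLoopB, dif_pos h, if_pos hm]
    simp only [dite_eq_ite] at ih
    have hdvd : i ∣ n := (PySem.Int.mod_eq_zero_iff_dvd n i).mp (by simpa using hm)
    have hq : PySem.Int.floordiv n i * i = n := by
      rw [PySem.Int.floordiv_eq_ediv_of_pos (by omega)]
      exact Int.ediv_mul_cancel hdvd
    have hq1 : 1 ≤ PySem.Int.floordiv n i := by nlinarith
    by_cases hne : i ≠ PySem.Int.floordiv n i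
    · have hle : i ≤ PySem.Int.floordiv n i := by nlinarith
      have hgt : i < PySem.Int.floordiv n i := by omega
      rw [if_pos hne] at ih ⊢
      apply ih (by omega)
      · exact List.pairwise_append.mpr ⟨ha, by simp, by intro s hs x hx; simp at hx; subst hx; exact hb s hs⟩
      · intro s hs; rcases List.mem_append.mp hs with hs | hs
        · have := hb s hs; omega
        · simp at hs; omega
      · intro s hs; rcases List.mem_append.mp hs with hs | hs
        · exact hh s hs
        · simp at hs; omega
      · intro s hs; rcases List.mem_append.mp hs with hs | hs
        · exact hf s hs
        · simp at hs; subst hs; exact h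
      · exact List.pairwise_append.mpr ⟨hc, by simp,
          by intro l hl x hx; simp at hx; subst hx
             have := hd2 l hl; nlinarith [he l hl]⟩
      · intro l hl; rcases List.mem_append.mp hl with hl | hl
        · exact he l hl
        · simp at hl; omega
      · intro l hl; rcases List.mem_append.mp hl with hl | hl
        · exact hd l hl
        · simp at hl; subst hl; nlinarith
      · intro l hl; rcases List.mem_append.mp hl with hl | hl
        · have := hd2 l hl; nlinarith [he l hl]
        · simp at hl; subst hl; nlinarith
    · rw [if_neg hne] at ih ⊢
      rw [not_not] at hne
      apply ih (by omega)
      · exact List.pairwise_append.mpr ⟨ha, by simp, by intro s hs x hx; simp at hx; subst hx; exact hb s hs⟩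
      · intro s hs; rcases List.mem_append.mp hs with hs | hs
        · have := hb s hs; omega
        · simp at hs; omega
      · intro s hs; rcases List.mem_append.mp hs with hs | hs
        · exact hh s hs
        · simp at hs; omega
      · intro s hs; rcases List.mem_append.mp hs with hs | hs
        · exact hf s hs
        · simp at hs; subst hs; exact h
      · exact hc
      · exact he
      · exact hd
      · intro l hl; have := hd2 l hl; nlinarith [he l hl]
  | case2 i small large h hm ih =>
    rw [pvLoopB, dif_pos h, if_neg hm]
    apply ih (by omega) ha
    · intro s hs; have := hb s hs; omega
    · exact hh
    · exact hf
    · exact hc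
    · exact he
    · exact hd
    · intro l hl; have := hd2 l hl; nlinarith [he l hl]
  | case3 i small large h =>
    rw [pvLoopB, dif_neg h]
    apply List.pairwise_append.mpr
    refine ⟨ha, ?_, ?_⟩
    · exact (List.pairwise_reverse).mpr hc
    · intro s hs l hl
      rw [List.mem_reverse] at hl
      have h1 := hf s hs
      have h2 := hd l hl
      have h3 := hh s hs
      have h4 := he l hl
      nlinarith

-- the sqrt loop, concatenated, is exactly the ascending divisor list
theorem pvLoopB_eq_divs (n : Int) :
    (pvLoopB n 1 [] []).1 ++ (pvLoopB n 1 [] []).2.reverse = pvDivsAsc n := by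
  apply List.eq_of_perm_of_sorted (le := (· < ·))
    (fun a b _ _ hab hba => absurd hab (by omega))
  · exact pvLoopB_pairwise n 1 [] [] (le_refl 1) (by simp) (by simp) (by simp)
      (by simp) (by simp) (by simp) (by simp) (by simp)
  · exact pvDivsAsc_pairwise n
  · apply (List.perm_ext_iff_of_nodup ?_ ?_).mpr
    · intro d
      rw [List.mem_append, List.mem_reverse,
        pvLoopB_mem_fst n 1 [] [] (le_refl 1) d,
        pvLoopB_mem_snd n 1 [] [] (le_refl 1) d, pvDivsAsc_mem]
      simp only [List.not_mem_nil, false_or]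
      constructor
      · rintro (⟨h1, h2, h3⟩ | ⟨j, h1, h2, h3, h4, h5⟩)
        · exact ⟨h1, by nlinarith, h3⟩
        · have hq : PySem.Int.floordiv n j * j = n := by
            rw [PySem.Int.floordiv_eq_ediv_of_pos (by omega)]
            exact Int.ediv_mul_cancel h3
          subst h5
          have hd1 : 1 ≤ PySem.Int.floordiv n j := by nlinarith
          refine ⟨hd1, by nlinarith, ?_⟩
          exact Dvd.intro j (by linarith [hq])
      · rintro ⟨h1, h2, h3⟩
        by_cases hsq : d * d ≤ n
        · exact Or.inl ⟨h1, hsq, h3⟩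
        · rw [not_le] at hsq
          obtain ⟨c, hc⟩ := h3
          have hc1 : 1 ≤ c := by nlinarith
          have hcd : c < d := by nlinarith
          have hq : PySem.Int.floordiv n c = d := by
            rw [PySem.Int.floordiv_eq_ediv_of_pos (by omega : (0:Int) < c), hc]
            exact Int.mul_ediv_cancel d (by omega)
          exact Or.inr ⟨c, hc1, by nlinarith, ⟨d, by rw [hc]; ring⟩, by rw [hq]; omega, hq.symm⟩
    · exact ((pvLoopB_pairwise n 1 [] [] (le_refl 1) (by simp) (by simp) (by simp)
        (by simp) (by simp) (by simp) (by simp) (by simp)).imp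
        (by omega : ∀ {a b : Int}, a < b → a ≠ b))
    · exact ((pvDivsAsc_pairwise n).imp (by omega : ∀ {a b : Int}, a < b → a ≠ b))

-- A's first selection loop is 'take 3 of the mid-range filter'
theorem pvPhase1_eq_take :
    ∀ (l ret : List Int), ret.length ≤ 3 →
      pvPhase1 l ret = ret ++ (l.filter (fun d => decide (4 ≤ d ∧ d ≤ 16))).take (3 - ret.length) := by
  intro l
  induction l with
  | nil => intro ret _; simp [pvPhase1]
  | cons d rest ih =>
    intro ret hlen
    rw [pvPhase1]
    by_cases h3 : ret.length = 3
    · simp [h3]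
    · rw [if_neg h3]
      by_cases hd : 4 ≤ d ∧ d ≤ 16
      · rw [if_pos hd, ih (ret ++ [d]) (by simp; omega)]
        have hcons : (d :: rest).filter (fun d => decide (4 ≤ d ∧ d ≤ 16))
            = d :: rest.filter (fun d => decide (4 ≤ d ∧ d ≤ 16)) := by
          simp [hd]
        rw [hcons]
        have h4 : 3 - ret.length = (3 - (ret ++ [d]).length) + 1 := by simp; omega
        rw [h4, List.take_succ_cons, List.append_assoc]
        rfl
      · rw [if_neg hd, ih ret hlen]
        have hcons : (d :: rest).filter (fun d => decide (4 ≤ d ∧ d ≤ 16))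
            = rest.filter (fun d => decide (4 ≤ d ∧ d ≤ 16)) := by
          simp [hd]
        rw [hcons]

-- pvFill keeps a full list unchanged
theorem pvFill_of_full : ∀ (l ret : List Int), ret.length = 3 → pvFill l ret = ret := by
  intro l; cases l with
  | nil => intro ret _; rfl
  | cons d rest => intro ret h; rw [pvFill, if_pos h]

-- A's second loop agrees with B's fill loop whenever the accumulator is not full
theorem pvPhase2_eq_fill :
    ∀ (l ret : List Int), ret.length < 3 → pvPhase2 l ret = pvFill l ret := by
  intro l
  induction l with
  | nil => intro ret _; rfl
  | cons d rest ih =>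
    intro ret hlen
    rw [pvPhase2, pvFill, if_neg (show ¬ ret.length = 3 by omega)]
    by_cases hd : d ∈ ret
    · rw [if_pos hd, if_neg (show ¬ ret.length = 3 by omega), if_pos hd]
      exact ih ret hlen
    · rw [if_neg hd, if_neg hd]
      by_cases hfull : (ret ++ [d]).length = 3
      · rw [if_pos hfull]
        exact (pvFill_of_full rest (ret ++ [d]) hfull).symm
      · rw [if_neg hfull]
        exact ih (ret ++ [d]) (by simp at hfull ⊢; omega)

-- ===== VERDICT (by name: the statement is the Claim_ definition above) =====
theorem generate_split_factor_py_spec : Claim_equal_generate_split_factor_py := by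
  intro n _
  unfold Spec_generate_split_factor_py generate_split_factor_py generate_split_factor_py_alt
  simp only []
  rw [pvTmpA_eq n, pvLoopB_eq_divs n]
  rw [pvPhase1_eq_take (pvDivsAsc n) [] (by simp)]
  simp only [List.nil_append, List.length_nil, Nat.sub_zero]
  by_cases hlt : (((pvDivsAsc n).filter (fun d => decide (4 ≤ d ∧ d ≤ 16))).take 3).length < 3
  · rw [if_pos hlt, if_pos hlt]
    exact pvPhase2_eq_fill (pvDivsAsc n).reverse _ hlt
  · rw [if_neg hlt, if_neg hlt]
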